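-- pv_equiv track=rewrite | github.com/w320alm/harmonic_balance | fluent-python-notebooks/20-descriptor/bulkfood/helpers.py | extract_doctsrings
-- ===== SOURCE A (Python) =====
-- def extract_doctsrings(source):
--     """ extract the docstrings from an ipython notebook cell
--
--     This will fail if a triple quote is inside a docstring
--     Args:
--         source (list): python source code as found in an ipynb file (a list of lines)
--
--     Returns:
--         A list of docstrings (each represented as a list of lines) and a list
--         of the lines that weren't part of docstrings. Docstrings will be
--         stripped of enclosing triple quotes.
--     """
--     docstrings = []
--     code = []
--     indocstring = False
--     target = code
--     for line in source:
--         if line.startswith("'''") or line.startswith('"""'):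
--             if indocstring:
--                 target = code
--             else:
--                 newtarget = list()
--                 docstrings.append(newtarget)
--                 target = newtarget
--             indocstring = not indocstring
--             continue
--         target.append(line)
--     return docstrings, code
-- ===== SOURCE B (Python) =====
-- def extract_doctsrings(source):
--     """Index-based segment walk instead of a toggle-flag state machine."""
--     docstrings = []
--     code = []
--     i = 0
--     n = len(source)
--     while i < n:
--         line = source[i]
--         if line.startswith("'''") or line.startswith('"""'):
--             j = i + 1
--             while j < n and not (source[j].startswith("'''") or source[j].startswith('"""')):
--                 j += 1
--             docstrings.append(source[i + 1:j])
--             i = j + 1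
--         else:
--             code.append(line)
--             i += 1
--     return docstrings, code
-- ===== Notes on version B (the rewrite author's own statement) =====
-- stated objective: alternative
-- what changed: Replaces the per-line toggle-flag/target-alias state machine with an index-based walk that scans forward to the closing delimiter and appends each docstring as a whole slice.
import Mathlib
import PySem

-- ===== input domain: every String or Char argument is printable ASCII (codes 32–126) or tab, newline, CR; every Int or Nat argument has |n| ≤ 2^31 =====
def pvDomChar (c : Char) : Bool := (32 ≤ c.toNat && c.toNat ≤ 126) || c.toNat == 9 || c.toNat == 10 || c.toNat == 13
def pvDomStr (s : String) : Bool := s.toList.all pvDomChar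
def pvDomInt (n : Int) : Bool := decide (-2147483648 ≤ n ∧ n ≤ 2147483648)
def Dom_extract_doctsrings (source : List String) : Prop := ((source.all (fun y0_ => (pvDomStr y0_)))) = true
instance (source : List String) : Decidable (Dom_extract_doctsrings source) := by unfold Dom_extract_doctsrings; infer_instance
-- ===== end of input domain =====

-- B replaces A's toggle-flag state machine by an index/segment walk (same cost, different decomposition).

-- ===== PORT A =====
def pvIsDelim (line : String) : Bool :=
  PySem.Str.startswith line "'''" || PySem.Str.startswith line "\"\"\""

-- A's 'target' alias: appending to the last docstring list models 'target.append(line)' while indocstring.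
def pvStepA (st : List (List String) × List String × Bool) (line : String) :
    List (List String) × List String × Bool :=
  match st with
  | (ds, code, indoc) =>
    if pvIsDelim line then
      if indoc then (ds, code, false) else (ds ++ [[]], code, true)
    else
      if indoc then (ds.dropLast ++ [ds.getLastD [] ++ [line]], code, indoc)
      else (ds, code ++ [line], indoc)

def extract_doctsrings (source : List String) : List (List String) × List String :=
  let r := source.foldl pvStepA ([], [], false)
  (r.1, r.2.1)

-- ===== PORT B =====
def extract_doctsrings_alt : List String → List (List String) × List String
  | [] => ([], [])
  | line :: rest =>
    if pvIsDelim line then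
      let doc := rest.takeWhile (fun l => !pvIsDelim l)
      let rest' := (rest.dropWhile (fun l => !pvIsDelim l)).drop 1
      let r := extract_doctsrings_alt rest'
      (doc :: r.1, r.2)
    else
      let r := extract_doctsrings_alt rest
      (r.1, line :: r.2)
termination_by src => src.length
decreasing_by
  · have h1 := List.length_dropWhile_le (fun l => !pvIsDelim l) rest
    simp only [List.length_cons, List.length_drop]
    omega
  · simp

-- ===== PRECONDITION & SPEC =====
def Spec_extract_doctsrings (source : List String) (out : List (List String) × List String) : Prop := out = extract_doctsrings_alt source
instance (source : List String) (out : List (List String) × List String) : Decidable (Spec_extract_doctsrings source out) := by unfold Spec_extract_doctsrings; infer_instance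

-- ===== CLAIM (what is proved, stated in full; the proofs are below) =====
def Claim_equal_extract_doctsrings : Prop := ∀ (source : List String), Dom_extract_doctsrings source → Spec_extract_doctsrings source (extract_doctsrings source)

-- ===== LEMMAS AND PROOFS =====

-- Joint invariant for A's fold, by strong induction on length:
-- from an indoc=false state the fold appends B's result; from an indoc=true state
-- (last docstring d open) the fold first closes d with the coming segment.
theorem pv_fold_inv (n : Nat) : ∀ (src : List String), src.length ≤ n →
    (∀ (ds : List (List String)) (code : List String),
      src.foldl pvStepA (ds, code, false) =
        ((ds ++ (extract_doctsrings_alt src).1, code ++ (extract_doctsrings_alt src).2,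
          (src.foldl pvStepA (ds, code, false)).2.2) :
          List (List String) × List String × Bool)) ∧
    (∀ (ds : List (List String)) (d : List String) (code : List String),
      src.foldl pvStepA (ds ++ [d], code, true) =
        ((ds ++ [d ++ src.takeWhile (fun l => !pvIsDelim l)] ++
            (extract_doctsrings_alt ((src.dropWhile (fun l => !pvIsDelim l)).drop 1)).1,
          code ++ (extract_doctsrings_alt ((src.dropWhile (fun l => !pvIsDelim l)).drop 1)).2,
          (src.foldl pvStepA (ds ++ [d], code, true)).2.2) :
          List (List String) × List String × Bool)) := by
  induction n with
  | zero =>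
    intro src hlen
    have : src = [] := List.eq_nil_of_length_eq_zero (Nat.le_zero.mp hlen)
    subst this
    constructor
    · intro ds code; simp [extract_doctsrings_alt]
    · intro ds d code; simp [extract_doctsrings_alt]
  | succ n ih =>
    intro src hlen
    cases src with
    | nil =>
      constructor
      · intro ds code; simp [extract_doctsrings_alt]
      · intro ds d code; simp [extract_doctsrings_alt]
    | cons line rest =>
      have hrest : rest.length ≤ n := by
        simpa using Nat.succ_le_succ_iff.mp hlen
      constructor
      · intro ds code
        by_cases hd : pvIsDelim line
        · -- opening delimiter: switch to indoc=true with a fresh empty docstring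
          have ht := ((ih rest hrest).2) ds [] code
          simp only [List.foldl_cons, pvStepA, hd, if_true, Bool.false_eq_true, reduceIte]
          rw [extract_doctsrings_alt]
          simp only [hd, if_pos]
          simp only [List.nil_append] at ht ⊢
          rw [ht]
          simp
        · have hf := ((ih rest hrest).1) ds (code ++ [line])
          simp only [List.foldl_cons, pvStepA, hd, Bool.false_eq_true, reduceIte]
          rw [extract_doctsrings_alt]
          simp only [hd, Bool.false_eq_true, if_false]
          rw [hf]
          simp
      · intro ds d code
        by_cases hd : pvIsDelim line
        · -- closing delimiter: back to indoc=false
          have hf := ((ih rest hrest).1) (ds ++ [d]) code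
          simp only [List.foldl_cons, pvStepA, hd, if_true]
          rw [hf]
          simp [List.takeWhile, List.dropWhile, hd]
        · -- body line: appended to the open docstring d
          have ht := ((ih rest hrest).2) ds (d ++ [line]) code
          simp only [List.foldl_cons, pvStepA, hd, Bool.false_eq_true, reduceIte, if_true]
          have hstep :
              (ds ++ [d]).dropLast ++ [(ds ++ [d]).getLastD [] ++ [line]] = ds ++ [d ++ [line]] := by
            simp
          rw [hstep, ht]
          simp [List.takeWhile, List.dropWhile, hd]

-- ===== VERDICT (by name: the statement is the Claim_ definition above) =====
theorem extract_doctsrings_spec : Claim_equal_extract_doctsrings := by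
  unfold Claim_equal_extract_doctsrings
  intro source _
  unfold Spec_extract_doctsrings extract_doctsrings
  have h := ((pv_fold_inv source.length source (le_refl _)).1) [] []
  rw [h]
  simp
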